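-- pv_equiv track=rewrite | github.com/QuietVenom/kiizama | packages/scrape_core/src/kiizama_scrape_core/ig_scraper/types/apify_ig_scraper.py | _normalize_usernames
-- ===== SOURCE A (Python) =====
-- APIFY_MAX_USERNAMES = 10
--
-- def _normalize_usernames(usernames: list[str]) -> list[str]:
--     normalized: list[str] = []
--     seen: set[str] = set()
--
--     for raw_username in usernames:
--         if not isinstance(raw_username, str):
--             continue
--
--         username = raw_username.strip().removeprefix("@").lower()
--         if not username or username in seen:
--             continue
--
--         seen.add(username)
--         normalized.append(username)
--
--         if len(normalized) >= APIFY_MAX_USERNAMES: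
--             break
--
--     return normalized
-- ===== SOURCE B (Python) =====
-- APIFY_MAX_USERNAMES = 10
--
-- def _normalize_usernames(usernames: list[str]) -> list[str]:
--     cands = [c for c in
--              (u.strip().removeprefix("@").lower()
--               for u in usernames if isinstance(u, str))
--              if c]
--
--     def pick(remaining: list[str], budget: int) -> list[str]:
--         if not remaining or budget == 0:
--             return []
--         head = remaining[0]
--         return [head] + pick([c for c in remaining[1:] if c != head], budget - 1)
--
--     return pick(cands, APIFY_MAX_USERNAMES)
-- ===== Notes on version B (the rewrite author's own statement) =====
-- stated objective: alternative
-- what changed: Dedup keeps no seen-set at all: after normalizing, a recursive pick takes the head, filters every later occurrence of it out of the remaining list, and recurses with a decremented budget that starts at 10, so the cap falls out of the recursion depth instead of A's length check and break.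
import Mathlib
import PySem

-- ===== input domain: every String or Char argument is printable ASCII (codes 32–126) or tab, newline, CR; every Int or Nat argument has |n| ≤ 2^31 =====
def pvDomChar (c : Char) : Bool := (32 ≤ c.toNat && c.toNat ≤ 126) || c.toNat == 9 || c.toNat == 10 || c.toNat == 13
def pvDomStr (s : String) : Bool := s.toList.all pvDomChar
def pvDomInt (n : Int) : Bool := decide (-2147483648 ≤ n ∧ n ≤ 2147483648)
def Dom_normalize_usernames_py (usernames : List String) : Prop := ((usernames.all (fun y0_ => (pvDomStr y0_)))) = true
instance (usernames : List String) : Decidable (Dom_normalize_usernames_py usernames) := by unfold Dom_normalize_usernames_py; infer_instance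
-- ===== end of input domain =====

-- B drops A's seen-set/early-break loop: a recursive pick takes the head, filters its occurrences out of the rest, and recurses with a budget starting at 10 (alternative decomposition, same cost).

-- ===== PORT A =====
-- shared normalization step: raw.strip().removeprefix("@").lower()
-- (removeprefix is not in PySem; ported by hand, exact: drop the first char iff the string starts with "@")
def pvNorm (raw : String) : String :=
  let t := PySem.Str.strip raw
  let t := if PySem.Str.startswith t "@" then PySem.Str.slice t (some 1) none else t
  PySem.Str.lower t

-- A's for-loop with `continue`s and the `break` at 10, as structural recursion over the input
def pvAuxA : List String → List String → PySem.Set String → List String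
  | [], normalized, _ => normalized
  | raw :: rest, normalized, seen =>
    let u := pvNorm raw
    if u = "" ∨ PySem.Set.contains seen u = true then
      pvAuxA rest normalized seen
    else
      let normalized' := normalized ++ [u]
      if 10 ≤ normalized'.length then normalized'
      else pvAuxA rest normalized' (PySem.Set.add seen u)

def normalize_usernames_py (usernames : List String) : List String :=
  pvAuxA usernames [] PySem.Set.empty

-- ===== PORT B =====
-- recursive pick: take the head, filter out its later occurrences, recurse with budget - 1
def pvPick : List String → Nat → List String
  | [], _ => []
  | _ :: _, 0 => []
  | h :: rest, Nat.succ b => h :: pvPick (rest.filter (fun c => c ≠ h)) b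

def normalize_usernames_py_alt (usernames : List String) : List String :=
  let cands := (usernames.map pvNorm).filter (fun c => c ≠ "")
  pvPick cands 10

-- ===== PRECONDITION & SPEC =====
def Spec_normalize_usernames_py (usernames : List String) (out : List String) : Prop := out = normalize_usernames_py_alt usernames
instance (usernames : List String) (out : List String) : Decidable (Spec_normalize_usernames_py usernames out) := by unfold Spec_normalize_usernames_py; infer_instance

-- ===== CLAIM (what is proved, stated in full; the proofs are below) =====
def Claim_equal_normalize_usernames_py : Prop := ∀ (usernames : List String), Dom_normalize_usernames_py usernames → Spec_normalize_usernames_py usernames (normalize_usernames_py usernames)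

-- ===== LEMMAS AND PROOFS =====

-- the new (not yet seen) elements, in order of first occurrence, relative to a seen-set
def pvDedupFrom (s : PySem.Set String) : List String → List String
  | [] => []
  | c :: cs =>
    if PySem.Set.contains s c = true then pvDedupFrom s cs
    else c :: pvDedupFrom (PySem.Set.add s c) cs

theorem pvAuxA_eq (l : List String) : ∀ (acc : List String) (seen : PySem.Set String),
    acc.length < 10 →
    pvAuxA l acc seen
      = acc ++ (pvDedupFrom seen ((l.map pvNorm).filter (fun c => c ≠ ""))).take (10 - acc.length) := by
  induction l with
  | nil => intro acc seen _; simp [pvAuxA, pvDedupFrom]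
  | cons raw rest ih =>
    intro acc seen hlen
    by_cases he : pvNorm raw = ""
    · simp [pvAuxA, he, ih acc seen hlen]
    · by_cases hs : pvNorm raw ∈ seen
      · simp [pvAuxA, he, hs, pvDedupFrom, ih acc seen hlen]
      · by_cases hfull : 10 ≤ acc.length + 1
        · have h9 : acc.length = 9 := by omega
          simp [pvAuxA, he, hs, pvDedupFrom, h9]
        · have hlt : acc.length + 1 < 10 := by omega
          have hrec := ih (acc ++ [pvNorm raw]) (PySem.Set.add seen (pvNorm raw)) (by simpa using hlt)
          have h2 : 10 - (acc ++ [pvNorm raw]).length = 9 - acc.length := by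
            simp only [List.length_append, List.length_cons, List.length_nil]; omega
          rw [h2] at hrec
          simp [PySem.Set.add, hs] at hrec
          simp [pvAuxA, he, hs, hfull, pvDedupFrom, hrec]
          have ht : 10 - acc.length = (9 - acc.length) + 1 := by omega
          rw [ht, List.take_succ_cons]

-- pvDedupFrom depends on the seen-set only through membership
theorem pvDedupFrom_congr (cs : List String) : ∀ (s t : PySem.Set String),
    (∀ y, y ∈ s ↔ y ∈ t) → pvDedupFrom s cs = pvDedupFrom t cs := by
  induction cs with
  | nil => intro s t _; rfl
  | cons c cs ih =>
    intro s t h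
    by_cases hc : c ∈ s
    · have hct : c ∈ t := (h c).mp hc
      simp [pvDedupFrom, hc, hct, ih s t h]
    · have hct : c ∉ t := fun hx => hc ((h c).mpr hx)
      have hext : ∀ y, y ∈ s ++ [c] ↔ y ∈ t ++ [c] := by
        intro y; simp [h y]
      simp [pvDedupFrom, PySem.Set.add, hc, hct, ih _ _ hext]

-- marking x as seen = deleting all occurrences of x from the rest
theorem pvDedupFrom_add (cs : List String) : ∀ (s : PySem.Set String) (x : String),
    pvDedupFrom (PySem.Set.add s x) cs = pvDedupFrom s (cs.filter (fun c => c ≠ x)) := by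
  induction cs with
  | nil => intro s x; rfl
  | cons c cs ih =>
    intro s x
    by_cases hx : c = x
    · subst hx
      simp [pvDedupFrom, PySem.Set.mem_add, ih s c]
    · by_cases hc : c ∈ s
      · simp [pvDedupFrom, PySem.Set.mem_add, hx, hc, ih s x]
      · have hcx : c ∉ PySem.Set.add s x := by
          simp [PySem.Set.mem_add, hc, hx]
        have hext : ∀ y, y ∈ PySem.Set.add (PySem.Set.add s x) c ↔ y ∈ PySem.Set.add (PySem.Set.add s c) x := by
          intro y
          simp only [PySem.Set.mem_add]
          tauto
        have hih := ih (PySem.Set.add s c) x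
        have hcg := pvDedupFrom_congr cs _ _ hext
        simp [pvDedupFrom, hx, hc, hcx, PySem.Set.add, PySem.Set.mem_add] at hih hcg ⊢
        by_cases hxs : x ∈ s
        · have h2 := ih (s ++ [c]) x
          have hx2 : x ∈ s ++ [c] := List.mem_append_left _ hxs
          simp [PySem.Set.add, hx2] at h2
          simp [hxs, hc, h2]
        · simp [hxs, hc, hx, Ne.symm hx] at hcg hih ⊢
          rw [hcg, hih]

-- the budgeted recursive pick = take of the seen-set dedup
theorem pvPick_eq_take_dedup : ∀ (k : Nat) (cs : List String),
    pvPick cs k = (pvDedupFrom PySem.Set.empty cs).take k := by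
  intro k
  induction k with
  | zero => intro cs; cases cs <;> simp [pvPick, pvDedupFrom]
  | succ k ih =>
    intro cs
    cases cs with
    | nil => simp [pvPick, pvDedupFrom]
    | cons h rest =>
      have hadd := pvDedupFrom_add rest PySem.Set.empty h
      simp [PySem.Set.empty, PySem.Set.add] at hadd
      simp [pvPick, pvDedupFrom, PySem.Set.empty, PySem.Set.add, ih, hadd]

-- ===== VERDICT (by name: the statement is the Claim_ definition above) =====
theorem normalize_usernames_py_spec : Claim_equal_normalize_usernames_py := by
  intro usernames _
  unfold Spec_normalize_usernames_py normalize_usernames_py normalize_usernames_py_alt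
  rw [pvAuxA_eq _ _ _ (by simp)]
  simp [pvPick_eq_take_dedup]
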